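-- pv_equiv track=rewrite | github.com/tianao-meng/Pattern-Recognition | A1/a1q4.py | separte
-- ===== SOURCE A (Python) =====
-- def separte(feature, label):
--     data_class_0_index = []
--     data_class_1_index = []
--     data_class_0 = []
--     data_class_1 = []
--     index = 0
--     for i in label:
--         if i == 0:
--             data_class_0_index.append(index)
--             index += 1
--         else :
--             data_class_1_index.append(index)
--             index += 1
--
--     for i in data_class_0_index:
--         data_class_0.append(feature[i])
--     for i in data_class_1_index:
--         data_class_1.append(feature[i])
--     return data_class_0, data_class_1
-- ===== SOURCE B (Python) =====
-- def separte(feature, label):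
--     data_class_0 = []
--     data_class_1 = []
--     for idx, lab in enumerate(label):
--         if lab == 0:
--             data_class_0.append(feature[idx])
--         else:
--             data_class_1.append(feature[idx])
--     return data_class_0, data_class_1
-- ===== Notes on version B (the rewrite author's own statement) =====
-- stated objective: simpler
-- what changed: Single enumerate pass appending each feature row directly to its class list, eliminating the two intermediate index lists and the two subsequent gather loops.
import Mathlib
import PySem

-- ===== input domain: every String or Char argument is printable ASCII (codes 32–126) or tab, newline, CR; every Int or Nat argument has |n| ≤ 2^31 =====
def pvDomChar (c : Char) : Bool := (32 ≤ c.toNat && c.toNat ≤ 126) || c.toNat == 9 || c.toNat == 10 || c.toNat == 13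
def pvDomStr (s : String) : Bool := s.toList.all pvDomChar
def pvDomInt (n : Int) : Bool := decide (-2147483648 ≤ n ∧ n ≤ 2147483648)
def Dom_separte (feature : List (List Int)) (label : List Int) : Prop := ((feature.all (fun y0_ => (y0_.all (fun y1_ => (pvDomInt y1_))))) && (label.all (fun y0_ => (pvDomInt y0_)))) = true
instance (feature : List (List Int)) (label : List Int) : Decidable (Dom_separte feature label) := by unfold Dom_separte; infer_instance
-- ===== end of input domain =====

-- B is a single pass: one loop over the labels that appends each feature row directly to
-- its class list, with no intermediate index lists (objective: simpler).

-- ===== PORT A =====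
-- first loop of A: build the two index lists, threading the running index
def separteStep (s : List Int × List Int × Int) (i : Int) : List Int × List Int × Int :=
  if i = 0 then (s.1 ++ [s.2.2], s.2.1, s.2.2 + 1)
  else (s.1, s.2.1 ++ [s.2.2], s.2.2 + 1)

-- second/third loop of A: data_class.append(feature[i])  (pyGetD: in range under Pre_)
def separtePick (feature : List (List Int)) (ixs : List Int) : List (List Int) :=
  ixs.foldl (fun acc i => acc ++ [PySem.List.pyGetD feature i []]) []

def separte (feature : List (List Int)) (label : List Int) : List (List Int) × List (List Int) :=
  let s := label.foldl separteStep ([], [], 0)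
  (separtePick feature s.1, separtePick feature s.2.1)

-- ===== PORT B =====
-- single pass over enumerate(label); built by structural recursion on the label list
def separteGo (feature : List (List Int)) (label : List Int) (idx : Int) : List (List Int) × List (List Int) :=
  match label with
  | [] => ([], [])
  | lab :: rest =>
    let r := separteGo feature rest (idx + 1)
    if lab = 0 then (PySem.List.pyGetD feature idx [] :: r.1, r.2)
    else (r.1, PySem.List.pyGetD feature idx [] :: r.2)

def separte_alt (feature : List (List Int)) (label : List Int) : List (List Int) × List (List Int) :=
  separteGo feature label 0

-- ===== PRECONDITION & SPEC =====
-- Pre_ excludes exactly the inputs where both Pythons raise IndexError (more labels than feature rows).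
def Pre_separte (feature : List (List Int)) (label : List Int) : Prop :=
  label.length ≤ feature.length
instance (feature : List (List Int)) (label : List Int) : Decidable (Pre_separte feature label) := by unfold Pre_separte; infer_instance

def pvWitness_separte : List (List Int) × List Int := ([[1, 2], [3, 4], [5, 6]], [0, 1, 0])

def Spec_separte (feature : List (List Int)) (label : List Int) (out : List (List Int) × List (List Int)) : Prop := out = separte_alt feature label
instance (feature : List (List Int)) (label : List Int) (out : List (List Int) × List (List Int)) : Decidable (Spec_separte feature label out) := by unfold Spec_separte; infer_instance

-- ===== CLAIM (what is proved, stated in full; the proofs are below) =====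
def Claim_equal_separte : Prop := ∀ (feature : List (List Int)) (label : List Int), Dom_separte feature label → Pre_separte feature label → Spec_separte feature label (separte feature label)

-- ===== LEMMAS AND PROOFS =====

theorem separtePick_append (feature : List (List Int)) (xs : List Int) (acc : List (List Int)) :
    xs.foldl (fun a i => a ++ [PySem.List.pyGetD feature i []]) acc
      = acc ++ xs.map (fun i => PySem.List.pyGetD feature i []) := by
  induction xs generalizing acc with
  | nil => simp
  | cons x xs ih => simp [List.foldl, ih]

theorem separtePick_eq_map (feature : List (List Int)) (xs : List Int) :
    separtePick feature xs = xs.map (fun i => PySem.List.pyGetD feature i []) := by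
  rw [separtePick, separtePick_append]; simp

-- main invariant: A's fold from an arbitrary state, mapped through feature, equals
-- B's single pass started at the same index, appended to the accumulated parts
theorem separte_key (feature : List (List Int)) (label : List Int) (a0 a1 : List Int) (n : Int) :
    (separtePick feature (label.foldl separteStep (a0, a1, n)).1,
     separtePick feature (label.foldl separteStep (a0, a1, n)).2.1)
      = (separtePick feature a0 ++ (separteGo feature label n).1,
         separtePick feature a1 ++ (separteGo feature label n).2) := by
  induction label generalizing a0 a1 n with
  | nil => simp [separteGo]
  | cons lab rest ih =>
    by_cases h : lab = 0
    · simp only [List.foldl, separteStep, h, separteGo]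
      rw [ih]
      simp [separtePick_eq_map]
    · simp only [List.foldl, separteStep, if_neg h, separteGo]
      rw [ih]
      simp [separtePick_eq_map]

-- ===== VERDICT (by name: the statement is the Claim_ definition above) =====
theorem separte_spec : Claim_equal_separte := by
  intro feature label _ _
  unfold Spec_separte separte separte_alt
  simpa [separtePick] using separte_key feature label [] [] 0
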